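-- pv_equiv track=rewrite | github.com/ArtyomZemlyak/rulka | trackmania_rl/action_vector.py | _spec_to_layout
-- ===== SOURCE A (Python) =====
-- def _spec_to_layout(
--     spec: list[tuple[str, bool, int]],
-- ) -> tuple[int, list[tuple[str, int, int, int]], dict[str, tuple[int, int]]]:
--     """From spec (name, enabled, n_bins), return (n_action_dims, [(name, start, end, n_bins), ...], name_to_slice)."""
--     n_action_dims = 0
--     layout: list[tuple[str, int, int, int]] = []
--     name_to_slice: dict[str, tuple[int, int]] = {}
--     for name, enabled, n_bins in spec:
--         if enabled:
--             start = n_action_dims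
--             end = n_action_dims + n_bins
--             n_action_dims = end
--             layout.append((name, start, end, n_bins))
--             name_to_slice[name] = (start, end)
--     return n_action_dims, layout, name_to_slice
-- ===== SOURCE B (Python) =====
-- def _spec_to_layout(
--     spec: list[tuple[str, bool, int]],
-- ) -> tuple[int, list[tuple[str, int, int, int]], dict[str, tuple[int, int]]]:
--     """Table-based rewrite: filter enabled entries, build the cumulative boundary
--     table up front, then zip names/bins with consecutive boundary pairs."""
--     enabled = [(name, n_bins) for name, en, n_bins in spec if en]
--     bounds = [0]
--     for _, n in enabled:
--         bounds.append(bounds[-1] + n)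
--     layout = [(name, s, e, n) for (name, n), (s, e) in zip(enabled, zip(bounds, bounds[1:]))]
--     name_to_slice = {name: (s, e) for name, s, e, _ in layout}
--     return bounds[-1], layout, name_to_slice
-- ===== Notes on version B (the rewrite author's own statement) =====
-- stated objective: alternative
-- what changed: Replaces the single running-offset accumulator loop by a three-stage pipeline: filter enabled entries, precompute the cumulative boundary table, then zip consecutive boundary pairs into the layout and dict comprehensions.
import Mathlib
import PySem

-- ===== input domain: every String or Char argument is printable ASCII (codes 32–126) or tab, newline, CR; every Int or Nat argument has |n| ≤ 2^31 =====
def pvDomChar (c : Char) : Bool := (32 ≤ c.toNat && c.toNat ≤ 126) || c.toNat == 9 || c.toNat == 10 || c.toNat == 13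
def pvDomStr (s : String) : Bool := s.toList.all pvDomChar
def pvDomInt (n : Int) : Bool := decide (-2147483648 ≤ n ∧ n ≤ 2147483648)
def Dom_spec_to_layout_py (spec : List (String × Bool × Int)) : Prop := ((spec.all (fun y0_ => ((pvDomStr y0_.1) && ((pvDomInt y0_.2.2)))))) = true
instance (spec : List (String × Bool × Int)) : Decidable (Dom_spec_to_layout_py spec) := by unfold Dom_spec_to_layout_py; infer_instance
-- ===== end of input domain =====

-- B replaces A's running-offset accumulator loop by a three-stage pipeline (filter, cumulative
-- boundary table, zip of consecutive boundary pairs); same cost, alternative decomposition.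

-- ===== PORT A =====
def spec_to_layout_py (spec : List (String × Bool × Int)) : Int × (List (String × Int × Int × Int)) × (List (String × Int × Int)) :=
  let st := spec.foldl (fun (acc : Int × List (String × Int × Int × Int) × PySem.Dict String (Int × Int)) y =>
      if y.2.1 then
        let start := acc.1
        let e := acc.1 + y.2.2
        (e, acc.2.1 ++ [(y.1, start, e, y.2.2)], acc.2.2.insert y.1 (start, e))
      else acc)
    ((0 : Int), ([] : List (String × Int × Int × Int)), (PySem.Dict.empty : PySem.Dict String (Int × Int)))
  (st.1, st.2.1, st.2.2.items)

-- ===== PORT B =====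
def spec_to_layout_py_alt (spec : List (String × Bool × Int)) : Int × (List (String × Int × Int × Int)) × (List (String × Int × Int)) :=
  let enabled : List (String × Int) := spec.filterMap (fun y => if y.2.1 then some (y.1, y.2.2) else none)
  -- bounds starts as [0] and is never empty, so Python's bounds[-1] is its last element
  let bounds : List Int := enabled.foldl (fun bs p => bs ++ [bs.getLastD 0 + p.2]) [0]
  let layout := List.zipWith (fun (p : String × Int) (q : Int × Int) => (p.1, q.1, q.2, p.2)) enabled (bounds.zip bounds.tail)
  let nts := layout.foldl (fun (d : PySem.Dict String (Int × Int)) x => d.insert x.1 (x.2.1, x.2.2.1)) PySem.Dict.empty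
  (bounds.getLastD 0, layout, nts.items)

-- ===== PRECONDITION & SPEC =====
def Spec_spec_to_layout_py (spec : List (String × Bool × Int)) (out : Int × (List (String × Int × Int × Int)) × (List (String × Int × Int))) : Prop := out = spec_to_layout_py_alt spec
instance (spec : List (String × Bool × Int)) (out : Int × (List (String × Int × Int × Int)) × (List (String × Int × Int))) : Decidable (Spec_spec_to_layout_py spec out) := by unfold Spec_spec_to_layout_py; infer_instance

-- ===== CLAIM (what is proved, stated in full; the proofs are below) =====
def Claim_equal_spec_to_layout_py : Prop := ∀ (spec : List (String × Bool × Int)), Dom_spec_to_layout_py spec → Spec_spec_to_layout_py spec (spec_to_layout_py spec)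

-- ===== LEMMAS AND PROOFS =====

-- enabled entries of the spec, in order
def pvEn (spec : List (String × Bool × Int)) : List (String × Int) :=
  spec.filterMap (fun y => if y.2.1 then some (y.1, y.2.2) else none)

-- the layout produced from offset t
def pvBuild (t : Int) : List (String × Int) → List (String × Int × Int × Int)
  | [] => []
  | (n, b) :: r => (n, t, t + b, b) :: pvBuild (t + b) r

-- the strict cumulative boundaries after t
def pvTails (t : Int) : List (String × Int) → List Int
  | [] => []
  | (_, b) :: r => (t + b) :: pvTails (t + b) r

-- the final offset
def pvEnd (t : Int) : List (String × Int) → Int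
  | [] => t
  | (_, b) :: r => pvEnd (t + b) r

theorem pvBounds_eq (es : List (String × Int)) : ∀ (bs : List Int) (t : Int), bs.getLastD 0 = t →
    es.foldl (fun bs p => bs ++ [bs.getLastD 0 + p.2]) bs = bs ++ pvTails t es := by
  induction es with
  | nil => intro bs t _; simp [pvTails]
  | cons p r ih =>
    intro bs t h
    obtain ⟨n, b⟩ := p
    simp only [List.foldl_cons, pvTails]
    rw [ih (bs ++ [bs.getLastD 0 + b]) (t + b) (by simp [List.getLastD_eq_getLast?] at h ⊢; simp [h]), h]
    simp

theorem pvLast_tails (es : List (String × Int)) : ∀ t : Int, (t :: pvTails t es).getLastD 0 = pvEnd t es := by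
  induction es with
  | nil => intro t; simp [pvTails, pvEnd]
  | cons p r ih =>
    intro t
    obtain ⟨n, b⟩ := p
    simpa [pvTails, pvEnd] using ih (t + b)

theorem pvZip_eq (es : List (String × Int)) : ∀ t : Int,
    List.zipWith (fun (p : String × Int) (q : Int × Int) => (p.1, q.1, q.2, p.2)) es
      (((t :: pvTails t es)).zip (pvTails t es)) = pvBuild t es := by
  induction es with
  | nil => intro t; simp [pvTails, pvBuild]
  | cons p r ih =>
    intro t
    obtain ⟨n, b⟩ := p
    simpa [pvTails, pvBuild] using ih (t + b)

theorem pvFoldA (spec : List (String × Bool × Int)) :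
    ∀ (t : Int) (L : List (String × Int × Int × Int)) (D : PySem.Dict String (Int × Int)),
    spec.foldl (fun (acc : Int × List (String × Int × Int × Int) × PySem.Dict String (Int × Int)) y =>
      if y.2.1 then
        (acc.1 + y.2.2, acc.2.1 ++ [(y.1, acc.1, acc.1 + y.2.2, y.2.2)], acc.2.2.insert y.1 (acc.1, acc.1 + y.2.2))
      else acc) (t, L, D)
    = (pvEnd t (pvEn spec), L ++ pvBuild t (pvEn spec),
       (pvBuild t (pvEn spec)).foldl (fun d x => d.insert x.1 (x.2.1, x.2.2.1)) D) := by
  induction spec with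
  | nil => intro t L D; simp [pvEn, pvBuild, pvEnd]
  | cons y r ih =>
    intro t L D
    obtain ⟨n, en, b⟩ := y
    cases en with
    | false => simpa [pvEn] using ih t L D
    | true =>
      simp only [List.foldl_cons, pvEn, List.filterMap_cons, if_pos] at *
      simpa [pvBuild, pvEnd] using ih (t + b) (L ++ [(n, t, t + b, b)]) (D.insert n (t, t + b))

-- ===== VERDICT (by name: the statement is the Claim_ definition above) =====
theorem spec_to_layout_py_spec : Claim_equal_spec_to_layout_py := by
  intro spec _
  unfold Spec_spec_to_layout_py
  simp only [spec_to_layout_py, spec_to_layout_py_alt]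
  rw [pvFoldA]
  rw [show (spec.filterMap (fun y => if y.2.1 then some (y.1, y.2.2) else none)) = pvEn spec from rfl]
  rw [pvBounds_eq (pvEn spec) [0] 0 rfl]
  simp only [List.singleton_append, List.tail_cons]
  rw [pvLast_tails, pvZip_eq]
  simp
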